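-- pv_equiv track=rewrite | github.com/Ohjanghoon/coding-test-study | 프로그래머스/1/135808. 과일 장수/과일 장수.py | solution
-- ===== SOURCE A (Python) =====
-- def solution(k, m, score):
--     answer = 0
--     boxes = []
--
--     # 최고 점수순으로 내림차순 정렬
--     score.sort(reverse = True)
--
--     # 박스 포장하기(남는 사과는 버려짐)
--     for i in range(len(score) // m):
--         boxes.append(score[i*m : (i+1) * m])
--
--     for box in boxes:
--         # 최저 사과 점수 * 사과 개수
--         answer += min(box) * m
--
--
--     return answer
-- ===== SOURCE B (Python) =====
-- def solution(k, m, score):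
--     # Sort ascending instead of descending: the len(s) % m lowest scores are
--     # exactly the discarded leftovers, and each box minimum then sits at index
--     # base + j*m of the ascending order; sum them in one comprehension and
--     # multiply by m once at the end.  (Does not mutate score, unlike A.)
--     s = sorted(score)
--     base = len(s) % m
--     return sum(s[base + j * m] for j in range(len(s) // m)) * m
-- ===== Notes on version B (the rewrite author's own statement) =====
-- stated objective: simpler
-- what changed: B sorts ascending (A sorts descending in place), skips the len%m lowest leftover scores by an arithmetic offset instead of building per-box slices, and sums the box minima found at indices base+j*m in one comprehension, multiplying by m once at the end instead of per box; no boxes list and no min() scans.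
import Mathlib
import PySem

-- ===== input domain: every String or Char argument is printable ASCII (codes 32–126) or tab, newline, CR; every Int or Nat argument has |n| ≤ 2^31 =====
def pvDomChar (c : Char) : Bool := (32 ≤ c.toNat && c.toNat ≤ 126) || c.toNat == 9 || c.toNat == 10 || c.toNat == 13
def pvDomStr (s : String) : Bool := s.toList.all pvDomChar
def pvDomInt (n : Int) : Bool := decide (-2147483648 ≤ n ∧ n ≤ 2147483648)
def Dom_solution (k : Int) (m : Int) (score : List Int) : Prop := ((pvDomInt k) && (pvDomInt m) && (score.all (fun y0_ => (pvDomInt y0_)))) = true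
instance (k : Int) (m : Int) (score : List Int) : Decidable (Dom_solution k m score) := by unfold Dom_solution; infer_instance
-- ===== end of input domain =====

-- B sorts ascending (A sorts descending in place), skips the len%m lowest leftovers by an
-- arithmetic offset and sums the box minima found at indices base+j*m directly, multiplying
-- by m once at the end — no boxes list, no per-box slices, no min() scans (simpler decomposition).
-- A sorts `score` in place in Python (B does not); the equivalence proved is about the return value.


-- ===== PORT A =====
def solution (k : Int) (m : Int) (score : List Int) : Int :=
  let s := PySem.List.sorted score (fun x => x) true
  let boxes := (PySem.List.pyRange 0 (PySem.Int.floordiv (s.length : Int) m) 1).foldl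
      (fun bs i => bs ++ [PySem.List.slice s (some (i * m)) (some ((i + 1) * m))]) []
  boxes.foldl (fun answer box => answer + (PySem.List.min? box (fun y => y)).getD 0 * m) 0

-- ===== PORT B =====
def solution_alt (k : Int) (m : Int) (score : List Int) : Int :=
  let s := PySem.List.sorted score (fun x => x) false
  let base := PySem.Int.mod (s.length : Int) m
  ((PySem.List.pyRange 0 (PySem.Int.floordiv (s.length : Int) m) 1).foldl
      (fun total j => total + PySem.List.pyGetD s (base + j * m) 0) 0) * m

-- ===== PRECONDITION & SPEC =====
-- Pre_ excludes exactly m = 0, on which Python A raises ZeroDivisionError (B raises it too).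
def Pre_solution (k : Int) (m : Int) (score : List Int) : Prop := m ≠ 0
instance (k : Int) (m : Int) (score : List Int) : Decidable (Pre_solution k m score) := by unfold Pre_solution; infer_instance
def pvWitness_solution : Int × Int × List Int := (3, 1, [4, 1, 2])

def Spec_solution (k : Int) (m : Int) (score : List Int) (out : Int) : Prop := out = solution_alt k m score
instance (k : Int) (m : Int) (score : List Int) (out : Int) : Decidable (Spec_solution k m score out) := by unfold Spec_solution; infer_instance

-- ===== CLAIM (what is proved, stated in full; the proofs are below) =====
def Claim_equal_solution : Prop := ∀ (k : Int) (m : Int) (score : List Int), Dom_solution k m score → Pre_solution k m score → Spec_solution k m score (solution k m score)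

-- ===== LEMMAS AND PROOFS =====

-- Python's descending sort of an Int list is the reverse of its ascending sort
-- (as value lists: ties carry equal values).
lemma sorted_rev_eq_reverse (l : List Int) :
    PySem.List.sorted l (fun x => x) true = (PySem.List.sorted l (fun x => x) false).reverse := by
  have h1 : (PySem.List.sorted l (fun x => x) true).Pairwise (fun a b => b ≤ a) := by
    simpa using PySem.List.sorted_pairwise_rev l (fun x => x)
  have h2 : ((PySem.List.sorted l (fun x => x) false).reverse).Pairwise (fun a b => b ≤ a) := by
    rw [List.pairwise_reverse]
    simpa using PySem.List.sorted_pairwise l (fun x => x)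
  have hp : (PySem.List.sorted l (fun x => x) true).Perm
      ((PySem.List.sorted l (fun x => x) false).reverse) :=
    (PySem.List.sorted_perm l (fun x => x) true).trans
      ((PySem.List.sorted_perm l (fun x => x) false).symm.trans
        (List.reverse_perm _).symm)
  exact List.Perm.eq_of_pairwise (fun a b _ _ hab hba => le_antisymm hba hab) h1 h2 hp

-- On a descending-sorted cons cell, the last element is the running-min fold.
lemma foldl_min_desc : ∀ (t : List Int) (x : Int), (x :: t).Pairwise (fun a b => b ≤ a) →
    (x :: t).getLast? = some (t.foldl min x)
  | [], _, _ => rfl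
  | y :: t, x, h => by
    have hxy : y ≤ x := (List.pairwise_cons.mp h).1 y (by simp)
    have h' : (y :: t).Pairwise (fun a b => b ≤ a) := (List.pairwise_cons.mp h).2
    have ih := foldl_min_desc t y h'
    simp only [List.foldl_cons, min_eq_right hxy]
    simpa using ih

-- min? of a descending-sorted list is its last element.
lemma min?_desc (t : List Int) (h : t.Pairwise (fun a b => b ≤ a)) :
    PySem.List.min? t (fun y => y) = t.getLast? := by
  cases t with
  | nil => simp [PySem.List.min?_eq_none_iff]
  | cons x t => rw [PySem.List.min?_id_cons, foldl_min_desc t x h]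

-- The minimum of the j-th box of a descending-sorted list is the box's last element.
lemma box_min (s : List Int) (hdesc : s.Pairwise (fun a b => b ≤ a)) (M j : Nat)
    (hM : 0 < M) (hj : (j + 1) * M ≤ s.length) :
    (PySem.List.min? (PySem.List.slice s (some ((j : Int) * (M : Int)))
        (some (((j : Int) + 1) * (M : Int)))) (fun y => y)).getD 0
      = PySem.List.pyGetD s (((j : Int) + 1) * (M : Int) - 1) 0 := by
  have c1 : (j : Int) * (M : Int) = ((j * M : Nat) : Int) := by push_cast; ring
  have c2 : ((j : Int) + 1) * (M : Int) = (((j + 1) * M : Nat) : Int) := by push_cast; ring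
  have hjl : j * M + M ≤ s.length := by
    rw [Nat.succ_mul] at hj; omega
  rw [c1, c2, PySem.List.slice_natCast]
  have hsub : (j + 1) * M - j * M = M := by rw [Nat.succ_mul]; omega
  rw [hsub]
  set t := (s.drop (j * M)).take M with ht
  have hlen : t.length = M := by
    simp only [ht, List.length_take, List.length_drop]; omega
  have htd : t.Pairwise (fun a b => b ≤ a) :=
    hdesc.sublist ((List.take_sublist _ _).trans (List.drop_sublist _ _))
  rw [min?_desc t htd, List.getLast?_eq_getElem?, hlen]
  have hM1 : M - 1 < t.length := by omega
  have hget : t[M - 1]'hM1 = s[j * M + (M - 1)]'(by omega) := by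
    simp [ht, List.getElem_take, List.getElem_drop]
  have c3 : (((j + 1) * M : Nat) : Int) - 1 = ((j * M + (M - 1) : Nat) : Int) := by
    push_cast [Nat.cast_sub hM]; ring
  rw [c3, PySem.List.pyGetD_natCast]
  rw [List.getElem?_eq_getElem hM1, hget, List.getD_eq_getElem _ _ (by omega)]
  rfl

-- The j-th box minimum, read in the REVERSED (i.e. ascending) list: it sits at
-- ascending index n % M + (n/M - 1 - j) * M.
lemma box_min_asc (s : List Int) (M j : Nat) (hM : 0 < M) (hj : j < s.length / M) :
    PySem.List.pyGetD s.reverse (((j : Int) + 1) * (M : Int) - 1) 0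
      = s.getD (s.length % M + (s.length / M - 1 - j) * M) 0 := by
  have hjM : (j + 1) * M ≤ s.length :=
    (Nat.mul_le_mul_right M (by omega)).trans (Nat.div_mul_le_self _ _)
  have hnd : s.length % M + (s.length / M) * M = s.length := Nat.mod_add_div' s.length M
  have hpos1 : 1 ≤ (j + 1) * M := Nat.mul_pos (by omega) hM
  have key : (s.length / M - 1 - j) * M + (j + 1) * M = (s.length / M) * M := by
    rw [← Nat.add_mul]; congr 1; omega
  have c3 : ((j : Int) + 1) * (M : Int) - 1 = (((j + 1) * M - 1 : Nat) : Int) := by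
    push_cast [Nat.cast_sub hpos1]; ring
  rw [c3, PySem.List.pyGetD_natCast]
  have h1 : (j + 1) * M - 1 < s.reverse.length := by simp; omega
  have h2 : s.length % M + (s.length / M - 1 - j) * M < s.length := by omega
  rw [List.getD_eq_getElem _ _ h1, List.getD_eq_getElem _ _ h2, List.getElem_reverse]
  congr 1
  simp only [List.length_reverse] at *
  omega

lemma solution_eq : ∀ (k : Int) (m : Int) (score : List Int), Pre_solution k m score →
    solution k m score = solution_alt k m score := by
  intro k m score hm
  simp only [solution, solution_alt]
  rw [sorted_rev_eq_reverse]
  set s := PySem.List.sorted score (fun x => x) false with hs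
  have hasc : s.Pairwise (fun a b => a ≤ b) := by
    simpa using PySem.List.sorted_pairwise score (fun x => x)
  have hdesc : s.reverse.Pairwise (fun a b => b ≤ a) := by
    rw [List.pairwise_reverse]; simpa using hasc
  have hlenr : (s.reverse.length : Int) = (s.length : Int) := by simp
  rw [hlenr]
  rcases lt_or_gt_of_ne hm with hneg | hpos
  · -- m < 0: len(score) // m ≤ 0, both loops are empty
    have hn : PySem.Int.floordiv (s.length : Int) m ≤ 0 := by
      by_contra hc
      push_neg at hc
      have h1 := PySem.Int.floordiv_mul_add_mod (s.length : Int) m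
      have h2 := (PySem.Int.mod_neg_bounds (a := (s.length : Int)) hneg).2
      have hL : (0 : Int) ≤ (s.length : Int) := Int.natCast_nonneg _
      have hmul : 0 ≤ (PySem.Int.floordiv (s.length : Int) m - 1) * (-m) :=
        mul_nonneg (by omega) (by omega)
      nlinarith
    simp [PySem.List.pyRange_one_eq_nil hn]
  · -- m > 0
    obtain ⟨M, rfl⟩ : ∃ M : Nat, m = (M : Int) := ⟨m.toNat, (Int.toNat_of_nonneg hpos.le).symm⟩
    have hM : 0 < M := by exact_mod_cast hpos
    rw [PySem.Int.floordiv_natCast, PySem.Int.mod_natCast, PySem.List.pyRange_zero_natCast]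
    rw [PySem.List.foldl_append_singleton_eq_map
      (fun i : Int => PySem.List.slice s.reverse (some (i * M)) (some ((i + 1) * M)))]
    simp only [List.nil_append, List.map_map]
    rw [List.foldl_map, List.foldl_map]
    rw [PySem.List.foldl_add, PySem.List.foldl_add]
    simp only [zero_add, Function.comp_apply]
    -- pointwise rewrite of each side's summand over List.range (len/M)
    have hA : ∀ j ∈ List.range (s.length / M),
        (PySem.List.min? (PySem.List.slice s.reverse (some (((j : Nat) : Int) * (M : Int)))
            (some ((((j : Nat) : Int) + 1) * (M : Int)))) (fun y => y)).getD 0 * (M : Int)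
          = s.getD (s.length % M + (s.length / M - 1 - j) * M) 0 * (M : Int) := by
      intro j hjmem
      have hj : j < s.length / M := List.mem_range.mp hjmem
      have hjM : (j + 1) * M ≤ s.reverse.length := by
        simp only [List.length_reverse]
        exact (Nat.mul_le_mul_right M hj).trans (Nat.div_mul_le_self _ _)
      rw [box_min s.reverse hdesc M j hM hjM, box_min_asc s M j hM hj]
    have hB : ∀ j ∈ List.range (s.length / M),
        PySem.List.pyGetD s (((s.length % M : Nat) : Int) + ((j : Nat) : Int) * (M : Int)) 0
          = s.getD (s.length % M + j * M) 0 := by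
      intro j _
      have c : ((s.length % M : Nat) : Int) + ((j : Nat) : Int) * (M : Int)
          = ((s.length % M + j * M : Nat) : Int) := by push_cast; ring
      rw [c, PySem.List.pyGetD_natCast]
    rw [List.map_congr_left hA, List.map_congr_left hB]
    -- both are sums over range (len/M); A's sum is B's read back to front
    have bridgeA : ((List.range (s.length / M)).map
        (fun j => s.getD (s.length % M + (s.length / M - 1 - j) * M) 0 * (M : Int))).sum
        = ∑ j ∈ Finset.range (s.length / M),
            s.getD (s.length % M + (s.length / M - 1 - j) * M) 0 * (M : Int) := rfl
    have bridgeB : ((List.range (s.length / M)).map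
        (fun j => s.getD (s.length % M + j * M) 0)).sum
        = ∑ j ∈ Finset.range (s.length / M), s.getD (s.length % M + j * M) 0 := rfl
    rw [bridgeA, bridgeB,
      Finset.sum_range_reflect (fun j => s.getD (s.length % M + j * M) 0 * (M : Int))
        (s.length / M),
      ← Finset.sum_mul]

-- ===== VERDICT (by name: the statement is the Claim_ definition above) =====
theorem solution_spec : Claim_equal_solution := by
  intro k m score _ hpre
  exact solution_eq k m score hpre
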